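-- pv_equiv track=rewrite | github.com/CornellNLP/4300-Flask-Template | src/MealMap/mealmap.py | find_matching_dishes
-- ===== SOURCE A (Python) =====
-- def find_matching_dishes(sample_dish, name_ingredient_map):
--     matches = []
--     sample = sample_dish.lower()
--
--     for name in name_ingredient_map:
--         lower_name = name.lower()
--         if lower_name == sample:
--             return [name]
--         if sample in lower_name:
--             matches.append(name)
--
--     return matches
-- ===== SOURCE B (Python) =====
-- def find_matching_dishes(sample_dish, name_ingredient_map):
--     sample = sample_dish.lower()
--     exact = next((name for name in name_ingredient_map if name.lower() == sample), None)
--     if exact is not None: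
--         return [exact]
--     return [name for name in name_ingredient_map if sample in name.lower()]
-- ===== Notes on version B (the rewrite author's own statement) =====
-- stated objective: simpler
-- what changed: Replaces A's single fused loop with mutable accumulator and mid-loop early return by two independent passes: a first-match search for an exact (case-insensitive) name, and, only if that fails, a plain filter comprehension collecting substring matches.
import Mathlib
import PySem

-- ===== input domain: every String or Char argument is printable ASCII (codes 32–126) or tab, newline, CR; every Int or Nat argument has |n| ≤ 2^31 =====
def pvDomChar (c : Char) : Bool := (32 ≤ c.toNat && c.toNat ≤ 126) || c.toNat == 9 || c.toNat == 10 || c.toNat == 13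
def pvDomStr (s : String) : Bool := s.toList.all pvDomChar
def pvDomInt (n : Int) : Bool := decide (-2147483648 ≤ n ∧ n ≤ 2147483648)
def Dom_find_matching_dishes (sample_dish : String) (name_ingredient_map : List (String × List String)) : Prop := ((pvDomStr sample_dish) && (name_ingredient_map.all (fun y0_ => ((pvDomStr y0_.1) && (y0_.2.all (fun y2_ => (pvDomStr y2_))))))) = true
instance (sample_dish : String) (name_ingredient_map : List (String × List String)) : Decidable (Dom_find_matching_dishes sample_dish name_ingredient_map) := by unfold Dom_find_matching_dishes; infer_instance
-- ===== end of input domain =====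

-- B replaces A's fused loop (accumulator + mid-loop early return) by two independent
-- passes — an exact-match search, then a filter — for simplicity; same cost.


-- ===== PORT A =====
-- 'for name in name_ingredient_map' iterates the dict's keys: distinct keys in
-- insertion order = PySem.List.dedup of the association list's keys (exact).
def fmdLoopA (sample : String) (keys : List String) (acc : List String) : List String :=
  match keys with
  | [] => acc
  | name :: rest =>
    let lower_name := PySem.Str.lower name
    if lower_name == sample then [name]
    else if PySem.Str.isIn sample lower_name then fmdLoopA sample rest (acc ++ [name])
    else fmdLoopA sample rest acc

def find_matching_dishes (sample_dish : String) (name_ingredient_map : List (String × List String)) : List String :=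
  let sample := PySem.Str.lower sample_dish
  fmdLoopA sample (PySem.List.dedup (name_ingredient_map.map Prod.fst)) []

-- ===== PORT B =====
-- pass 1: first exact (case-insensitive) key ('next(…, None)' = List.find?);
-- pass 2 (only if none): comprehension filtering substring matches.
def find_matching_dishes_alt (sample_dish : String) (name_ingredient_map : List (String × List String)) : List String :=
  let sample := PySem.Str.lower sample_dish
  let keys := PySem.List.dedup (name_ingredient_map.map Prod.fst)
  match keys.find? (fun name => PySem.Str.lower name == sample) with
  | some name => [name]
  | none => keys.filter (fun name => PySem.Str.isIn sample (PySem.Str.lower name))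

-- ===== PRECONDITION & SPEC =====
def Spec_find_matching_dishes (sample_dish : String) (name_ingredient_map : List (String × List String)) (out : List String) : Prop := out = find_matching_dishes_alt sample_dish name_ingredient_map
instance (sample_dish : String) (name_ingredient_map : List (String × List String)) (out : List String) : Decidable (Spec_find_matching_dishes sample_dish name_ingredient_map out) := by unfold Spec_find_matching_dishes; infer_instance

-- ===== CLAIM (what is proved, stated in full; the proofs are below) =====
def Claim_equal_find_matching_dishes : Prop := ∀ (sample_dish : String) (name_ingredient_map : List (String × List String)), Dom_find_matching_dishes sample_dish name_ingredient_map → Spec_find_matching_dishes sample_dish name_ingredient_map (find_matching_dishes sample_dish name_ingredient_map)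

-- ===== LEMMAS AND PROOFS =====
-- A's loop = first exact match if any, else the accumulator followed by the substring filter.
theorem fmdLoopA_eq (sample : String) (keys acc : List String) :
    fmdLoopA sample keys acc =
      match keys.find? (fun name => PySem.Str.lower name == sample) with
      | some name => [name]
      | none => acc ++ keys.filter (fun name => PySem.Str.isIn sample (PySem.Str.lower name)) := by
  induction keys generalizing acc with
  | nil => simp [fmdLoopA]
  | cons n rest ih =>
    by_cases h : PySem.Str.lower n == sample
    · simp [fmdLoopA, h]
    · cases hf : List.find? (fun name => PySem.Str.lower name == sample) rest <;>
        simp [fmdLoopA, h, ih, hf, List.filter_cons] <;> split <;> simp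

-- ===== VERDICT (by name: the statement is the Claim_ definition above) =====
theorem find_matching_dishes_spec : Claim_equal_find_matching_dishes := by
  intro sample_dish name_ingredient_map _hDom
  unfold Spec_find_matching_dishes find_matching_dishes find_matching_dishes_alt
  simp only [fmdLoopA_eq, List.nil_append]
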